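-- pv_equiv track=rewrite | github.com/youilab/EncuestasStats | getters/get_data.py | get_q11_data
-- ===== SOURCE A (Python) =====
-- def get_q11_data(q11):
--     total = len(q11)
--     academia = 0
--     gobierno = 0
--     sociedad = 0
--     comercio = 0
--     industria = 0
--     for i in q11:
--         if 'Academia' in i:
--             academia += 1
--         if 'Gobierno' in i:
--             gobierno += 1
--         if 'Sociedad' in i:
--             sociedad += 1
--         if 'Comercio' in i:
--             comercio += 1
--         if 'Industria' in i:
--             industria += 1
--
--     data = {
--         'academia': [academia, total - academia],
--         'gobierno': [gobierno, total - gobierno],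
--         'sociedad': [sociedad, total - sociedad],
--         'comercio': [comercio, total - comercio],
--         'industria': [industria, total - industria],
--     }
--
--     return data
-- ===== SOURCE B (Python) =====
-- CATS = {
--     'academia': 'Academia',
--     'gobierno': 'Gobierno',
--     'sociedad': 'Sociedad',
--     'comercio': 'Comercio',
--     'industria': 'Industria',
-- }
--
-- def _count(label, q11):
--     return sum(1 for i in q11 if label in i)
--
-- def get_q11_data(q11):
--     total = len(q11)
--     return {k: [c, total - c]
--             for k, lab in CATS.items()
--             for c in [_count(lab, q11)]}
-- ===== Notes on version B (the rewrite author's own statement) =====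
-- stated objective: idiomatic
-- what changed: Replaces the single pass with five named accumulators by a label table and a dict comprehension doing one sum-of-booleans scan per category.
import Mathlib
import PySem

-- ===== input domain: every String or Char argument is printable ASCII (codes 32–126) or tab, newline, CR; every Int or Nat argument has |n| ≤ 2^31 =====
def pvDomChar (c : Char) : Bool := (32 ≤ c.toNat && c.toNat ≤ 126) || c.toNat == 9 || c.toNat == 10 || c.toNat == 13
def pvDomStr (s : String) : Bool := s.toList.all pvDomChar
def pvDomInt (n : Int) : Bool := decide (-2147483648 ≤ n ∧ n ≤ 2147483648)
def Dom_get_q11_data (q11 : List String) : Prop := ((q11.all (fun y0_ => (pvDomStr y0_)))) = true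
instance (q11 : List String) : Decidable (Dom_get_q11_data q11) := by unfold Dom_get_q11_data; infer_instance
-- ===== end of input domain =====

-- B replaces A's single pass with five named accumulators by a label table driving
-- one per-category sum-of-booleans scan (idiomatic table-driven decomposition, same cost).

-- ===== PORT A =====
-- A's loop: sequential `if 'Label' in i` updates of five counters.
def get_q11_loopA : List String → Int → Int → Int → Int → Int → (Int × Int × Int × Int × Int)
  | [], a, g, s, c, ind => (a, g, s, c, ind)
  | i :: rest, a, g, s, c, ind =>
      get_q11_loopA rest
        (if PySem.Str.isIn "Academia" i then a + 1 else a)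
        (if PySem.Str.isIn "Gobierno" i then g + 1 else g)
        (if PySem.Str.isIn "Sociedad" i then s + 1 else s)
        (if PySem.Str.isIn "Comercio" i then c + 1 else c)
        (if PySem.Str.isIn "Industria" i then ind + 1 else ind)

def get_q11_data (q11 : List String) : List (String × List Int) :=
  let total : Int := q11.length
  let r := get_q11_loopA q11 0 0 0 0 0
  [ ("academia", [r.1, total - r.1]),
    ("gobierno", [r.2.1, total - r.2.1]),
    ("sociedad", [r.2.2.1, total - r.2.2.1]),
    ("comercio", [r.2.2.2.1, total - r.2.2.2.1]),
    ("industria", [r.2.2.2.2, total - r.2.2.2.2]) ]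

-- ===== PORT B =====
-- _count(label, q11) = sum(1 for i in q11 if label in i)
def get_q11_count (label : String) (q11 : List String) : Int :=
  (q11.map (fun i => if PySem.Str.isIn label i then (1 : Int) else 0)).sum

def get_q11_cats : List (String × String) :=
  [("academia", "Academia"), ("gobierno", "Gobierno"), ("sociedad", "Sociedad"),
   ("comercio", "Comercio"), ("industria", "Industria")]

def get_q11_data_alt (q11 : List String) : List (String × List Int) :=
  let total : Int := q11.length
  get_q11_cats.map (fun kl =>
    let c := get_q11_count kl.2 q11
    (kl.1, [c, total - c]))

-- ===== PRECONDITION & SPEC =====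
def Spec_get_q11_data (q11 : List String) (out : List (String × List Int)) : Prop := out = get_q11_data_alt q11
instance (q11 : List String) (out : List (String × List Int)) : Decidable (Spec_get_q11_data q11 out) := by unfold Spec_get_q11_data; infer_instance

-- ===== CLAIM (what is proved, stated in full; the proofs are below) =====
def Claim_equal_get_q11_data : Prop := ∀ (q11 : List String), Dom_get_q11_data q11 → Spec_get_q11_data q11 (get_q11_data q11)

-- ===== LEMMAS AND PROOFS =====
lemma get_q11_loopA_eq (q11 : List String) (a g s c ind : Int) :
    get_q11_loopA q11 a g s c ind =
      (a + get_q11_count "Academia" q11,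
       g + get_q11_count "Gobierno" q11,
       s + get_q11_count "Sociedad" q11,
       c + get_q11_count "Comercio" q11,
       ind + get_q11_count "Industria" q11) := by
  induction q11 generalizing a g s c ind with
  | nil => simp [get_q11_loopA, get_q11_count]
  | cons x rest ih =>
      simp only [get_q11_loopA, ih, get_q11_count, List.map_cons, List.sum_cons, Prod.mk.injEq]
      refine ⟨?_, ?_, ?_, ?_, ?_⟩ <;> split_ifs <;> ring

-- ===== VERDICT (by name: the statement is the Claim_ definition above) =====
theorem get_q11_data_spec : Claim_equal_get_q11_data := by
  intro q11 _
  unfold Spec_get_q11_data get_q11_data get_q11_data_alt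
  simp [get_q11_loopA_eq, get_q11_cats]
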